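-- pv_equiv track=rewrite | github.com/darthmolen/ai-plugins-and-skills | skills/codebase-mapper/scripts/map_csharp.py | detect_frameworks
-- ===== SOURCE A (Python) =====
-- FRAMEWORK_INDICATORS = {
--     'Microsoft.AspNetCore': 'ASP.NET Core',
--     'Microsoft.EntityFrameworkCore': 'EF Core',
--     'System.Text.Json': 'System.Text.Json',
--     'Newtonsoft.Json': 'Newtonsoft.Json',
--     'MediatR': 'MediatR',
--     'FluentValidation': 'FluentValidation',
--     'Serilog': 'Serilog',
--     'AutoMapper': 'AutoMapper',
--     'Dapper': 'Dapper',
--     'xunit': 'xUnit',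
--     'NUnit': 'NUnit',
--     'Moq': 'Moq',
-- }
--
-- def detect_frameworks(all_usings: set[str]) -> list[str]:
--     """Detect frameworks from using statements."""
--     detected = []
--     for using, name in FRAMEWORK_INDICATORS.items():
--         for u in all_usings:
--             if u.startswith(using):
--                 if name not in detected:
--                     detected.append(name)
--                 break
--     return detected
-- ===== SOURCE B (Python) =====
-- FRAMEWORK_INDICATORS = {
--     'Microsoft.AspNetCore': 'ASP.NET Core',
--     'Microsoft.EntityFrameworkCore': 'EF Core',
--     'System.Text.Json': 'System.Text.Json',
--     'Newtonsoft.Json': 'Newtonsoft.Json',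
--     'MediatR': 'MediatR',
--     'FluentValidation': 'FluentValidation',
--     'Serilog': 'Serilog',
--     'AutoMapper': 'AutoMapper',
--     'Dapper': 'Dapper',
--     'xunit': 'xUnit',
--     'NUnit': 'NUnit',
--     'Moq': 'Moq',
-- }
--
-- # Hash index: prefix -> framework name, plus the distinct prefix lengths.
-- # A using u matches indicator p iff u[:len(p)] == p, so it suffices to slice u
-- # at each distinct indicator length and look the slice up in the index.
-- _IDX = dict(FRAMEWORK_INDICATORS)
-- _LENS = sorted({len(p) for p in FRAMEWORK_INDICATORS})
--
--
-- def detect_frameworks(all_usings: set[str]) -> list[str]: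
--     """Detect frameworks from using statements."""
--     matched = set()
--     for u in all_usings:
--         for L in _LENS:
--             name = _IDX.get(u[:L])
--             if name is not None:
--                 matched.add(name)
--     return [name for name in FRAMEWORK_INDICATORS.values() if name in matched]
-- ===== Notes on version B (the rewrite author's own statement) =====
-- stated objective: alternative
-- what changed: Replaces A's per-framework scan of the usings with startswith and break by a hash index: one pass over the usings slicing each at the distinct indicator lengths and looking the slice up in a prefix->name dict to build a matched set, then an ordered emit over FRAMEWORK_INDICATORS.values().
import Mathlib
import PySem

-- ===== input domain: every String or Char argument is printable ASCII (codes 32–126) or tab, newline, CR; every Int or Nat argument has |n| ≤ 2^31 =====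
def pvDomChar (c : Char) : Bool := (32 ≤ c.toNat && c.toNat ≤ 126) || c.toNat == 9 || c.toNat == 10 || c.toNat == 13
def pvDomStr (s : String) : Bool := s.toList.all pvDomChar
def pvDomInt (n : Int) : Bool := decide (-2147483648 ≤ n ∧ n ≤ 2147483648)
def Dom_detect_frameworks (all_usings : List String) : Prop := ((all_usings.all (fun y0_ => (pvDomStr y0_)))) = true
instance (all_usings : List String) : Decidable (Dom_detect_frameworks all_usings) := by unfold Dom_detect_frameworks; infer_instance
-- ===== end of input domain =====

-- B replaces A's per-framework scan of the usings (startswith + break + in-list test) by a hash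
-- index: one pass over the usings, slicing each at the distinct indicator lengths and looking the
-- slice up in a prefix->name dict to build a matched set, then an ordered emit over the indicator
-- values (objective: alternative; same order of cost).


-- FRAMEWORK_INDICATORS, in insertion order
def frameworkIndicators : List (String × String) :=
  [("Microsoft.AspNetCore", "ASP.NET Core"),
   ("Microsoft.EntityFrameworkCore", "EF Core"),
   ("System.Text.Json", "System.Text.Json"),
   ("Newtonsoft.Json", "Newtonsoft.Json"),
   ("MediatR", "MediatR"),
   ("FluentValidation", "FluentValidation"),
   ("Serilog", "Serilog"),
   ("AutoMapper", "AutoMapper"),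
   ("Dapper", "Dapper"),
   ("xunit", "xUnit"),
   ("NUnit", "NUnit"),
   ("Moq", "Moq")]

-- ===== PORT A =====
-- for each (using, name): scan all_usings, break at the first prefix match (find?), then append name if new
def detect_frameworks (all_usings : List String) : List String :=
  frameworkIndicators.foldl
    (fun detected p =>
      match all_usings.find? (fun u => PySem.Str.startswith u p.1) with
      | some _ => if p.2 ∈ detected then detected else detected ++ [p.2]
      | none => detected)
    []

-- ===== PORT B =====
-- _IDX = dict(FRAMEWORK_INDICATORS): the prefix -> name hash index
def frameworkIndex : PySem.Dict String String := PySem.Dict.ofList frameworkIndicators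
-- _LENS = sorted({len(p) for p in FRAMEWORK_INDICATORS}) (precomputed module constant)
def frameworkLens : List Nat := [3, 5, 6, 7, 10, 15, 16, 20, 29]
-- u[:L] for a nonnegative literal L is take (exact: Python slice u[:L] with L ≥ 0 clamps like take)
def strTake (u : String) (L : Nat) : String := String.ofList (u.toList.take L)

def detect_frameworks_alt (all_usings : List String) : List String :=
  let matched : PySem.Set String :=
    all_usings.foldl
      (fun m u =>
        frameworkLens.foldl
          (fun m L =>
            match PySem.Dict.get? frameworkIndex (strTake u L) with
            | some name => PySem.Set.add m name
            | none => m)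
          m)
      PySem.Set.empty
  (frameworkIndicators.map Prod.snd).filter (fun n => PySem.Set.contains matched n)

-- ===== PRECONDITION & SPEC =====
def Spec_detect_frameworks (all_usings : List String) (out : List String) : Prop := out = detect_frameworks_alt all_usings
instance (all_usings : List String) (out : List String) : Decidable (Spec_detect_frameworks all_usings out) := by unfold Spec_detect_frameworks; infer_instance

-- ===== CLAIM (what is proved, stated in full; the proofs are below) =====
def Claim_equal_detect_frameworks : Prop := ∀ (all_usings : List String), Dom_detect_frameworks all_usings → Spec_detect_frameworks all_usings (detect_frameworks all_usings)

-- ===== LEMMAS AND PROOFS =====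

-- the common canonical value: indicator entries with some matching using, names in indicator order
def pvCanon (xs : List String) (L : List (String × String)) : List String :=
  (L.filter (fun p => xs.any (fun u => PySem.Str.startswith u p.1))).map Prod.snd

theorem pvCanon_nil (xs : List String) : pvCanon xs [] = [] := rfl

theorem pvCanon_cons (xs : List String) (p : String × String) (L : List (String × String)) :
    pvCanon xs (p :: L) =
      if xs.any (fun u => PySem.Str.startswith u p.1) = true
      then p.2 :: pvCanon xs L else pvCanon xs L := by
  simp only [pvCanon, List.filter_cons]
  split <;> simp

theorem pvA_foldl (xs : List String) :
    ∀ (L : List (String × String)) (acc : List String),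
      (∀ p ∈ L, p.2 ∉ acc) →
      (L.map Prod.snd).Nodup →
      L.foldl
        (fun detected p =>
          match xs.find? (fun u => PySem.Str.startswith u p.1) with
          | some _ => if p.2 ∈ detected then detected else detected ++ [p.2]
          | none => detected)
        acc = acc ++ pvCanon xs L := by
  intro L
  induction L with
  | nil => intro acc _ _; simp [pvCanon_nil]
  | cons p L ih =>
    intro acc hacc hnd
    simp only [List.map_cons, List.nodup_cons] at hnd
    have hp2 : p.2 ∉ acc := hacc p (List.mem_cons_self ..)
    simp only [List.foldl_cons]
    cases hf : xs.find? (fun u => PySem.Str.startswith u p.1) with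
    | some u =>
      have hany : xs.any (fun u => PySem.Str.startswith u p.1) = true := by
        exact List.any_eq_true.mpr ⟨u, List.mem_of_find?_eq_some hf,
          List.find?_some (p := fun u => PySem.Str.startswith u p.1) hf⟩
      rw [if_neg hp2]
      rw [ih (acc ++ [p.2])
          (by
            intro q hq
            have hne : q.2 ≠ p.2 := by
              intro h
              exact hnd.1 (h ▸ List.mem_map_of_mem hq)
            simp [hacc q (List.mem_cons_of_mem _ hq), hne])
          hnd.2]
      rw [pvCanon_cons, if_pos hany]
      simp
    | none =>
      have hany : xs.any (fun u => PySem.Str.startswith u p.1) = false := by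
        simp only [List.any_eq_false]
        intro u hu
        exact List.find?_eq_none.mp hf u hu
      rw [ih acc (fun q hq => hacc q (List.mem_cons_of_mem _ hq)) hnd.2]
      rw [pvCanon_cons, if_neg (by rw [hany]; simp)]

-- the hash index is exactly the indicator association: lookups hit iff the pair is an indicator
theorem pvIdx_get (s n : String) :
    frameworkIndex.get? s = some n ↔ (s, n) ∈ frameworkIndicators := by
  have hitems : frameworkIndex.items = frameworkIndicators := by decide
  have hnd : frameworkIndex.keys.Nodup := by decide
  rw [PySem.Dict.get?_eq_some_iff_mem_items _ _ _ hnd, hitems]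

-- slicing u at an indicator's length and hitting the index ≡ u starts with that indicator
theorem pvSlice_hit (u n : String) :
    (∃ L ∈ frameworkLens, frameworkIndex.get? (strTake u L) = some n) ↔
      ∃ p, (p, n) ∈ frameworkIndicators ∧ PySem.Str.startswith u p = true := by
  constructor
  · rintro ⟨L, _, hget⟩
    refine ⟨strTake u L, (pvIdx_get _ _).mp hget, ?_⟩
    rw [PySem.Str.startswith_eq, PySem.Chars.startswith_iff]
    unfold strTake
    rw [String.toList_ofList]
    exact List.take_prefix L u.toList
  · rintro ⟨p, hp, hsw⟩
    rw [PySem.Str.startswith_eq, PySem.Chars.startswith_iff] at hsw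
    have htake : u.toList.take p.toList.length = p.toList :=
      (List.prefix_iff_eq_take.mp hsw).symm
    have hTake : strTake u p.toList.length = p := by
      unfold strTake
      rw [htake, String.ofList_toList]
    refine ⟨p.toList.length, ?_, by rw [hTake]; exact (pvIdx_get _ _).mpr hp⟩
    fin_cases hp <;> decide

-- membership after the inner fold over the lengths
theorem pvInner_mem (u : String) (x : String) :
    ∀ (lens : List Nat) (m : PySem.Set String),
      x ∈ lens.foldl
          (fun m L =>
            match PySem.Dict.get? frameworkIndex (strTake u L) with
            | some name => PySem.Set.add m name
            | none => m) m ↔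
        x ∈ m ∨ ∃ L ∈ lens, frameworkIndex.get? (strTake u L) = some x := by
  intro lens
  induction lens with
  | nil => simp
  | cons L lens ih =>
    intro m
    simp only [List.foldl_cons]
    cases hget : frameworkIndex.get? (strTake u L) with
    | some name =>
      rw [ih]
      simp only [PySem.Set.mem_add, List.mem_cons]
      constructor
      · rintro ((h | rfl) | h)
        · exact Or.inl h
        · exact Or.inr ⟨L, Or.inl rfl, hget⟩
        · obtain ⟨L', hL', h'⟩ := h; exact Or.inr ⟨L', Or.inr hL', h'⟩
      · rintro (h | ⟨L', (rfl | hL'), h'⟩)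
        · exact Or.inl (Or.inl h)
        · exact Or.inl (Or.inr (by rw [hget] at h'; exact (Option.some_inj.mp h').symm))
        · exact Or.inr ⟨L', hL', h'⟩
    | none =>
      rw [ih]
      simp only [List.mem_cons]
      constructor
      · rintro (h | ⟨L', hL', h'⟩)
        · exact Or.inl h
        · exact Or.inr ⟨L', Or.inr hL', h'⟩
      · rintro (h | ⟨L', (rfl | hL'), h'⟩)
        · exact Or.inl h
        · rw [hget] at h'; exact absurd h' (by simp)
        · exact Or.inr ⟨L', hL', h'⟩

-- membership in the matched set after the outer fold over the usings
theorem pvMatched_mem (x : String) :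
    ∀ (xs : List String) (m : PySem.Set String),
      x ∈ xs.foldl
          (fun m u =>
            frameworkLens.foldl
              (fun m L =>
                match PySem.Dict.get? frameworkIndex (strTake u L) with
                | some name => PySem.Set.add m name
                | none => m) m) m ↔
        x ∈ m ∨ ∃ u ∈ xs, ∃ p, (p, x) ∈ frameworkIndicators ∧ PySem.Str.startswith u p = true := by
  intro xs
  induction xs with
  | nil => simp
  | cons u xs ih =>
    intro m
    simp only [List.foldl_cons]
    rw [ih, pvInner_mem, pvSlice_hit]
    simp only [List.mem_cons]
    constructor
    · rintro ((h | h) | ⟨u', hu', h'⟩)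
      · exact Or.inl h
      · exact Or.inr ⟨u, Or.inl rfl, h⟩
      · exact Or.inr ⟨u', Or.inr hu', h'⟩
    · rintro (h | ⟨u', (rfl | hu'), h'⟩)
      · exact Or.inl (Or.inl h)
      · exact Or.inl (Or.inr h')
      · exact Or.inr ⟨u', hu', h'⟩

theorem pvB_eq (xs : List String) :
    detect_frameworks_alt xs = pvCanon xs frameworkIndicators := by
  have hnd : (frameworkIndicators.map Prod.snd).Nodup := by decide
  unfold detect_frameworks_alt pvCanon
  rw [List.filter_map]
  congr 1
  apply List.filter_congr
  intro p hp
  simp only [Function.comp_apply]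
  rw [Bool.eq_iff_iff]
  rw [PySem.Set.contains_eq_listContains, List.contains_iff_mem, pvMatched_mem]
  simp only [PySem.Set.empty, List.not_mem_nil, false_or, List.any_eq_true]
  constructor
  · rintro ⟨u, hu, q, hq, hsw⟩
    have : q = p.1 := by
      have := List.inj_on_of_nodup_map hnd hq hp rfl
      exact congrArg Prod.fst this
    exact ⟨u, hu, this ▸ hsw⟩
  · rintro ⟨u, hu, hsw⟩
    exact ⟨u, hu, p.1, by simpa using hp, hsw⟩

-- ===== VERDICT (by name: the statement is the Claim_ definition above) =====
theorem detect_frameworks_spec : Claim_equal_detect_frameworks := by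
  intro xs _
  unfold Spec_detect_frameworks detect_frameworks
  rw [pvB_eq xs, pvA_foldl xs frameworkIndicators [] (by simp) (by decide)]
  simp
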